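-- pv_equiv track=rewrite | github.com/JoseBlanca/franklin | scripts/split_seq_by_description_tag.py | get_item_from_tag
-- ===== SOURCE A (Python) =====
-- def get_item_from_tag(description, tag):
--     'get the value of the tag from a string separated by spaces'
--     items = description.split(" ")
--     for item in items:
--         try:
--             key, value = item.split(':')
--             if key == tag:
--                 return value
--         except ValueError:
--             pass
-- ===== SOURCE B (Python) =====
-- def get_item_from_tag(description, tag):
--     'get the value of the tag from a string separated by spaces'
--     index = {}
--     for item in description.split(' '):
--         parts = item.split(':')
--         if len(parts) == 2 and parts[0] not in index:
--             index[parts[0]] = parts[1]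
--     return index.get(tag)
-- ===== Notes on version B (the rewrite author's own statement) =====
-- stated objective: alternative
-- what changed: B builds a first-occurrence key:value index over all tokens in one pass and then answers by a single dict lookup, instead of A's scan that early-returns on the first matching token.
import Mathlib
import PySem

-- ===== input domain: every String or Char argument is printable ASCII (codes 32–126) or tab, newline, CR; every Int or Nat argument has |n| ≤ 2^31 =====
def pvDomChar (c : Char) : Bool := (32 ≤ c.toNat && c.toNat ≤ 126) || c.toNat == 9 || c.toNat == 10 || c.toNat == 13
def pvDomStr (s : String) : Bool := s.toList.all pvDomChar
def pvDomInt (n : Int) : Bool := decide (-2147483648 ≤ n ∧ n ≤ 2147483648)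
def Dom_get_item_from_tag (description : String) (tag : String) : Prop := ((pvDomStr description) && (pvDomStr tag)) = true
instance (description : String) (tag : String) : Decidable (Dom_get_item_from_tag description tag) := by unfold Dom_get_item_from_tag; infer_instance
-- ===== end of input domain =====

-- B replaces A's early-returning scan by a one-pass first-occurrence key:value index followed by a single lookup; alternative decomposition, same cost.

-- s.split(sep) for a NONEMPTY literal separator, via PySem.Chars.splitOn (exact)
def pvSplit (s : String) (sep : String) : List String :=
  (PySem.Chars.splitOn s.toList sep.toList).map String.ofList

-- ===== PORT A =====
-- the for-loop of A: first token that splits into exactly key:value with key == tag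
def pvScanA : List String → String → Option String
  | [], _ => none
  | item :: rest, tag =>
    match pvSplit item ":" with
    | [key, value] => if key == tag then some value else pvScanA rest tag
    | _ => pvScanA rest tag

def get_item_from_tag (description : String) (tag : String) : Option String :=
  pvScanA (pvSplit description " ") tag

-- ===== PORT B =====
-- B's index-building loop: record each key:value pair only at its first occurrence
def pvBuildB : List String → PySem.Dict String String → PySem.Dict String String
  | [], d => d
  | item :: rest, d =>
    let parts := pvSplit item ":"
    pvBuildB rest
      (if parts.length = 2 ∧ d.contains (parts.getD 0 "") = false
       then d.insert (parts.getD 0 "") (parts.getD 1 "")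
       else d)

def get_item_from_tag_alt (description : String) (tag : String) : Option String :=
  (pvBuildB (pvSplit description " ") PySem.Dict.empty).get? tag

-- ===== PRECONDITION & SPEC =====
def Spec_get_item_from_tag (description : String) (tag : String) (out : Option String) : Prop := out = get_item_from_tag_alt description tag
instance (description : String) (tag : String) (out : Option String) : Decidable (Spec_get_item_from_tag description tag out) := by unfold Spec_get_item_from_tag; infer_instance

-- ===== CLAIM (what is proved, stated in full; the proofs are below) =====
def Claim_equal_get_item_from_tag : Prop := ∀ (description : String) (tag : String), Dom_get_item_from_tag description tag → Spec_get_item_from_tag description tag (get_item_from_tag description tag)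

-- ===== LEMMAS AND PROOFS =====

-- invariant of B's loop: looking up tag in the finished index is "first match in the
-- dict so far, else A's first match among the remaining tokens"
lemma pvBuildB_get? (items : List String) (d : PySem.Dict String String) (tag : String) :
    (pvBuildB items d).get? tag = (d.get? tag).or (pvScanA items tag) := by
  induction items generalizing d with
  | nil => simp [pvBuildB, pvScanA]
  | cons item rest ih =>
    simp only [pvBuildB, pvScanA]
    rcases hp : pvSplit item ":" with _ | ⟨k, _ | ⟨v, _ | _⟩⟩
    · rw [if_neg (by simp), ih]
    · rw [if_neg (by simp), ih]
    · simp only [List.getD_cons_zero, List.getD_cons_succ]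
      by_cases hc : (d.contains k) = false
      · rw [if_pos (by simp [hc]), ih]
        by_cases hk : k = tag
        · subst hk
          have hnone : d.get? k = none := by
            have := PySem.Dict.contains_eq_isSome_get? (d := d) (k := k)
            cases h : d.get? k with
            | none => rfl
            | some w => rw [h] at this; simp [this] at hc
          simp [hnone, PySem.Dict.get?_insert_self]
        · rw [PySem.Dict.get?_insert_of_ne _ _ (fun h => hk h.symm)]
          simp [beq_iff_eq, hk]
      · rw [if_neg (by simp [hc]), ih]
        by_cases hk : k = tag
        · subst hk
          have hsome : (d.get? k).isSome := by
            rw [← PySem.Dict.contains_eq_isSome_get?]; simpa using hc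
          cases h : d.get? k with
          | none => rw [h] at hsome; simp at hsome
          | some w => simp
        · simp [beq_iff_eq, hk]
    · rw [if_neg (by simp), ih]

-- ===== VERDICT (by name: the statement is the Claim_ definition above) =====
theorem get_item_from_tag_spec : Claim_equal_get_item_from_tag := by
  intro description tag _
  show get_item_from_tag description tag = get_item_from_tag_alt description tag
  unfold get_item_from_tag get_item_from_tag_alt
  rw [pvBuildB_get?]
  simp [PySem.Dict.get?_empty]
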